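-- pv_equiv track=rewrite | github.com/wcyyyooooo/algorithm | 打卡/2月/day20.py | assignTasks
-- ===== SOURCE A (Python) =====
-- from typing import List
--
-- import heapq
--
-- def assignTasks(servers: List[int], tasks: List[int]) -> List[int]:
--     q = []
--     t = []
--     for i, s in enumerate(servers):
--         q.append([s, i])
--     heapq.heapify(q)
--     i = 0
--     cur = 0
--     ans = [0] * len(tasks)
--     while i < len(tasks):
--         while len(t) and t[0][0] <= i:
--             x = heapq.heappop(t)
--             heapq.heappush(q, [x[1], x[2]])
--         if len(q) == 0:
--             x = heapq.heappop(t)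
--             cur = max(x[0], i, cur)
--             heapq.heappush(q, [x[1], x[2]])
--         a = heapq.heappop(q)
--         ans[i] = a[1]
--         cur = max(cur, i)
--         heapq.heappush(t, [cur + tasks[i], a[0], a[1]])
--         i += 1
--     return ans
-- ===== SOURCE B (Python) =====
-- from typing import List
--
-- def assignTasks(servers: List[int], tasks: List[int]) -> List[int]:
--     free = [(w, idx) for idx, w in enumerate(servers)]   # (weight, index)
--     busy = []                                            # (freetime, weight, index)
--     cur = 0
--     ans = []
--     for i, need in enumerate(tasks):
--         still = []
--         for e in busy:
--             if e[0] <= i: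
--                 free.append((e[1], e[2]))
--             else:
--                 still.append(e)
--         busy = still
--         if not free:
--             b = busy[0]
--             for e in busy[1:]:
--                 if e < b:
--                     b = e
--             busy.remove(b)
--             cur = max(b[0], i, cur)
--             free.append((b[1], b[2]))
--         f = free[0]
--         for e in free[1:]:
--             if e < f:
--                 f = e
--         free.remove(f)
--         ans.append(f[1])
--         cur = max(cur, i)
--         busy.append((cur + need, f[0], f[1]))
--     return ans
-- ===== Notes on version B (the rewrite author's own statement) =====
-- stated objective: simpler
-- what changed: Replaces both binary heaps (heapq) by plain lists: a one-pass partition moves freed servers back, and the (weight,index) / (freetime,weight,index) minima are found by linear scans instead of heap pops.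
-- outside the precondition, e.g. on assignTasks([], [1]): A raises IndexError, B raises IndexError
import Mathlib
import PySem

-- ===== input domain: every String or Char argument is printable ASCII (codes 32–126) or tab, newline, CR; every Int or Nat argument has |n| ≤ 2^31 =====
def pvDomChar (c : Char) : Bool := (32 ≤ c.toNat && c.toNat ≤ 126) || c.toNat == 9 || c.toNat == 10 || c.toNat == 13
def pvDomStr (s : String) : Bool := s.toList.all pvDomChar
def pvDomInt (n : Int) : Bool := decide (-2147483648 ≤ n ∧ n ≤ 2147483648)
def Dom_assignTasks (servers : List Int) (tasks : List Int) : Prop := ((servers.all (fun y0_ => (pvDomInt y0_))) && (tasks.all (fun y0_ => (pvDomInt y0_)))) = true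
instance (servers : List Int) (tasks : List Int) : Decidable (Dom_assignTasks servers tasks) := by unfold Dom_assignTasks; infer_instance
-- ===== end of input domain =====

-- B replaces A's two binary heaps by two plain lists with one-pass partition / linear min scans
-- (objective: simpler / alternative; same results, selection is by the same (weight,index) /
-- (freetime,weight,index) lexicographic minima).

-- Python list comparison on [a,b] / [a,b,c] int lists (lexicographic, strict)
def lt2 (a b : Int × Int) : Bool := a.1 < b.1 || (a.1 == b.1 && a.2 < b.2)
def lt3 (a b : Int × Int × Int) : Bool := a.1 < b.1 || (a.1 == b.1 && lt2 a.2 b.2)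

-- ===== PORT A =====
-- heapq is ported by its observable contract on a heap of distinct-valued int lists:
-- heappop = remove (one occurrence of) the lexicographic minimum, heappush = add the element,
-- heapify = identity on the multiset of elements (exact for the values A computes).
def pymin {α : Type} (lt : α → α → Bool) (x y : α) : α := if lt y x then y else x

def findMin {α : Type} (lt : α → α → Bool) : List α → Option α
  | [] => none
  | x :: xs => some (xs.foldl (pymin lt) x)

theorem foldl_pymin_mem {α : Type} (lt : α → α → Bool) :
    ∀ (xs : List α) (x : α), xs.foldl (pymin lt) x ∈ x :: xs := by
  intro xs
  induction xs with
  | nil => intro x; simp [List.foldl]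
  | cons e rest ih =>
    intro x
    have h := ih (pymin lt x e)
    simp only [List.foldl]
    cases hc : lt e x with
    | true =>
      rw [show pymin lt x e = e by simp [pymin, hc]] at h ⊢
      rcases List.mem_cons.mp h with h1 | h1
      · simp [h1]
      · simp [h1]
    | false =>
      rw [show pymin lt x e = x by simp [pymin, hc]] at h ⊢
      rcases List.mem_cons.mp h with h1 | h1
      · simp [h1]
      · simp [h1]

theorem findMin_mem {α : Type} (lt : α → α → Bool) {l : List α} {m : α}
    (h : findMin lt l = some m) : m ∈ l := by
  cases l with
  | nil => simp [findMin] at h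
  | cons x xs =>
    simp [findMin] at h
    subst h
    exact foldl_pymin_mem lt xs x

-- while len(t) and t[0][0] <= i: heapq.heappush(q, …heapq.heappop(t)…)
def drainA (i : Int) (q : List (Int × Int)) (t : List (Int × Int × Int)) :
    List (Int × Int) × List (Int × Int × Int) :=
  match hm : findMin lt3 t with
  | none => (q, t)
  | some m =>
    if m.1 ≤ i then
      drainA i (q ++ [(m.2.1, m.2.2)]) (t.erase m)
    else (q, t)
termination_by t.length
decreasing_by
  have hmem : m ∈ t := findMin_mem lt3 hm
  have := List.length_erase_of_mem hmem
  have : t.length ≠ 0 := by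
    intro h0
    rw [List.length_eq_zero_iff] at h0
    subst h0; simp at hmem
  omega

-- the while i < len(tasks) loop of A (i counts up, one task per step)
def goA (i cur : Int) (q : List (Int × Int)) (t : List (Int × Int × Int)) :
    List Int → List Int
  | [] => []
  | task :: rest =>
    let p := drainA i q t
    let s :=
      if p.1.isEmpty then
        match findMin lt3 p.2 with
        | none => (cur, p.1, p.2)        -- unreachable inside Pre_: Python raises IndexError here
        | some x => (max (max x.1 i) cur, p.1 ++ [(x.2.1, x.2.2)], p.2.erase x)
      else (cur, p.1, p.2)
    match findMin lt2 s.2.1 with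
    | none => 0 :: goA (i + 1) s.1 s.2.1 s.2.2 rest   -- unreachable inside Pre_
    | some a =>
      let cur3 := max s.1 i
      a.2 :: goA (i + 1) cur3 (s.2.1.erase a) (s.2.2 ++ [(cur3 + task, a.1, a.2)]) rest

def assignTasks (servers : List Int) (tasks : List Int) : List Int :=
  goA 0 0 ((PySem.List.enumerate servers).foldl (fun q p => q ++ [(p.2, p.1)]) []) [] tasks

-- ===== PORT B =====
-- linear min scan: f = free[0]; for e in free[1:]: if e < f: f = e
def scanMin2 (b : Int × Int) : List (Int × Int) → Int × Int
  | [] => b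
  | e :: rest => scanMin2 (if lt2 e b then e else b) rest

def scanMin3 (b : Int × Int × Int) : List (Int × Int × Int) → Int × Int × Int
  | [] => b
  | e :: rest => scanMin3 (if lt3 e b then e else b) rest

-- the single pass over busy: ready servers (as (weight,index)) and the remaining busy list
def splitBusy (i : Int) : List (Int × Int × Int) → List (Int × Int) × List (Int × Int × Int)
  | [] => ([], [])
  | e :: rest =>
    let p := splitBusy i rest
    if e.1 ≤ i then ((e.2.1, e.2.2) :: p.1, p.2) else (p.1, e :: p.2)

def goB (i cur : Int) (free : List (Int × Int)) (busy : List (Int × Int × Int)) :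
    List Int → List Int
  | [] => []
  | need :: rest =>
    let p := splitBusy i busy
    let free1 := free ++ p.1
    let busy1 := p.2
    let s :=
      if free1.isEmpty then
        match busy1 with
        | [] => (cur, free1, busy1)      -- unreachable inside Pre_: Python raises IndexError here
        | b0 :: bs =>
          let b := scanMin3 b0 bs
          (max (max b.1 i) cur, free1 ++ [(b.2.1, b.2.2)], busy1.erase b)
      else (cur, free1, busy1)
    match s.2.1 with
    | [] => 0 :: goB (i + 1) s.1 s.2.1 s.2.2 rest   -- unreachable inside Pre_
    | f0 :: fs =>
      let f := scanMin2 f0 fs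
      let cur3 := max s.1 i
      f.2 :: goB (i + 1) cur3 (s.2.1.erase f) (s.2.2 ++ [(cur3 + need, f.1, f.2)]) rest

def assignTasks_alt (servers : List Int) (tasks : List Int) : List Int :=
  goB 0 0 ((PySem.List.enumerate servers).map (fun p => (p.2, p.1))) [] tasks

-- ===== PRECONDITION & SPEC =====
-- Pre_ excludes exactly the inputs where Python A raises IndexError (heappop from an empty
-- heap): no servers but at least one task. B raises there too (min scan of an empty list).
def Pre_assignTasks (servers : List Int) (tasks : List Int) : Prop :=
  tasks = [] ∨ servers ≠ []
instance (servers : List Int) (tasks : List Int) : Decidable (Pre_assignTasks servers tasks) := by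
  unfold Pre_assignTasks; infer_instance

def pvWitness_assignTasks : List Int × List Int := ([3, 3, 2], [1, 2, 3, 2, 1, 2])

def Spec_assignTasks (servers : List Int) (tasks : List Int) (out : List Int) : Prop := out = assignTasks_alt servers tasks
instance (servers : List Int) (tasks : List Int) (out : List Int) : Decidable (Spec_assignTasks servers tasks out) := by unfold Spec_assignTasks; infer_instance

-- ===== CLAIM (what is proved, stated in full; the proofs are below) =====
def Claim_equal_assignTasks : Prop := ∀ (servers : List Int) (tasks : List Int), Dom_assignTasks servers tasks → Pre_assignTasks servers tasks → Spec_assignTasks servers tasks (assignTasks servers tasks)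

-- ===== LEMMAS AND PROOFS =====

theorem lt2_irrefl (a : Int × Int) : lt2 a a = false := by
  obtain ⟨a1, a2⟩ := a; simp [lt2]

theorem lt3_irrefl (a : Int × Int × Int) : lt3 a a = false := by
  obtain ⟨a1, a2, a3⟩ := a; simp [lt3, lt2]

theorem lt2_asymm {a b : Int × Int} (h : lt2 a b = true) : lt2 b a = false := by
  obtain ⟨a1, a2⟩ := a; obtain ⟨b1, b2⟩ := b
  simp [lt2] at h ⊢; omega

theorem lt3_asymm {a b : Int × Int × Int} (h : lt3 a b = true) : lt3 b a = false := by
  obtain ⟨a1, a2, a3⟩ := a; obtain ⟨b1, b2, b3⟩ := b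
  simp [lt3, lt2] at h ⊢; omega

theorem lt3_ge_trans {a b c : Int × Int × Int} (h1 : lt3 b a = false) (h2 : lt3 c b = false) :
    lt3 c a = false := by
  obtain ⟨a1, a2, a3⟩ := a; obtain ⟨b1, b2, b3⟩ := b; obtain ⟨c1, c2, c3⟩ := c
  simp [lt3, lt2] at h1 h2 ⊢; omega

theorem lt2_ge_trans {a b c : Int × Int} (h1 : lt2 b a = false) (h2 : lt2 c b = false) :
    lt2 c a = false := by
  obtain ⟨a1, a2⟩ := a; obtain ⟨b1, b2⟩ := b; obtain ⟨c1, c2⟩ := c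
  simp [lt2] at h1 h2 ⊢; omega

theorem lt2_antisymm {a b : Int × Int} (h1 : lt2 a b = false) (h2 : lt2 b a = false) : a = b := by
  obtain ⟨a1, a2⟩ := a; obtain ⟨b1, b2⟩ := b
  simp [lt2] at h1 h2; simp [Prod.mk.injEq]; omega

theorem lt3_antisymm {a b : Int × Int × Int} (h1 : lt3 a b = false) (h2 : lt3 b a = false) :
    a = b := by
  obtain ⟨a1, a2, a3⟩ := a; obtain ⟨b1, b2, b3⟩ := b
  simp [lt3, lt2] at h1 h2; simp [Prod.mk.injEq]; omega

-- the fold minimum is a lower bound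
theorem foldl_pymin_lb {α : Type} (lt : α → α → Bool)
    (hIrr : ∀ a, lt a a = false) (hAs : ∀ {a b}, lt a b = true → lt b a = false)
    (hT : ∀ {a b c}, lt b a = false → lt c b = false → lt c a = false) :
    ∀ (xs : List α) (x : α) (z : α), z ∈ x :: xs → lt z (xs.foldl (pymin lt) x) = false := by
  intro xs
  induction xs with
  | nil =>
    intro x z hz
    simp at hz; subst hz; simp [List.foldl, hIrr]
  | cons e rest ih =>
    intro x z hz
    simp only [List.foldl]
    have hmin_x : lt x (pymin lt x e) = false := by
      cases hc : lt e x with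
      | true => rw [show pymin lt x e = e by simp [pymin, hc]]; exact hAs hc
      | false => rw [show pymin lt x e = x by simp [pymin, hc]]; exact hIrr x
    have hmin_e : lt e (pymin lt x e) = false := by
      cases hc : lt e x with
      | true => rw [show pymin lt x e = e by simp [pymin, hc]]; exact hIrr e
      | false => rw [show pymin lt x e = x by simp [pymin, hc]]; exact hc
    have hfold : lt (pymin lt x e) (rest.foldl (pymin lt) (pymin lt x e)) = false :=
      ih (pymin lt x e) _ (List.mem_cons_self)
    rcases List.mem_cons.mp hz with h1 | h1
    · subst h1; exact hT hfold hmin_x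
    · rcases List.mem_cons.mp h1 with h2 | h2
      · subst h2; exact hT hfold hmin_e
      · exact ih (pymin lt x e) z (List.mem_cons_of_mem _ h2)

theorem findMin_none_iff {α : Type} (lt : α → α → Bool) {l : List α} :
    findMin lt l = none ↔ l = [] := by
  cases l <;> simp [findMin]

theorem findMin_lb {α : Type} (lt : α → α → Bool)
    (hIrr : ∀ a, lt a a = false) (hAs : ∀ {a b}, lt a b = true → lt b a = false)
    (hT : ∀ {a b c}, lt b a = false → lt c b = false → lt c a = false)
    {l : List α} {m : α} (h : findMin lt l = some m) : ∀ z ∈ l, lt z m = false := by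
  cases l with
  | nil => simp [findMin] at h
  | cons x xs =>
    simp [findMin] at h
    subst h
    exact fun z hz => foldl_pymin_lb lt hIrr hAs hT xs x z hz

theorem findMin_perm {α : Type} (lt : α → α → Bool)
    (hIrr : ∀ a, lt a a = false) (hAs : ∀ {a b}, lt a b = true → lt b a = false)
    (hT : ∀ {a b c}, lt b a = false → lt c b = false → lt c a = false)
    (hAnti : ∀ {a b}, lt a b = false → lt b a = false → a = b)
    {l1 l2 : List α} (hp : l1.Perm l2) : findMin lt l1 = findMin lt l2 := by
  cases h1 : findMin lt l1 with
  | none =>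
    rw [findMin_none_iff] at h1; subst h1
    have : l2 = [] := hp.symm.eq_nil
    subst this; simp [findMin]
  | some m1 =>
    cases h2 : findMin lt l2 with
    | none =>
      rw [findMin_none_iff] at h2; subst h2
      have := hp.eq_nil; subst this; simp [findMin] at h1
    | some m2 =>
      have hm1 : m1 ∈ l2 := hp.mem_iff.mp (findMin_mem lt h1)
      have hm2 : m2 ∈ l1 := hp.mem_iff.mpr (findMin_mem lt h2)
      have hb1 := findMin_lb lt hIrr hAs hT h2 m1 hm1
      have hb2 := findMin_lb lt hIrr hAs hT h1 m2 hm2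
      exact congrArg some (hAnti hb1 hb2)

theorem findMin3_perm {l1 l2 : List (Int × Int × Int)} (hp : l1.Perm l2) :
    findMin lt3 l1 = findMin lt3 l2 :=
  findMin_perm lt3 lt3_irrefl (fun h => lt3_asymm h) (fun h1 h2 => lt3_ge_trans h1 h2)
    (fun h1 h2 => lt3_antisymm h1 h2) hp

theorem findMin2_perm {l1 l2 : List (Int × Int)} (hp : l1.Perm l2) :
    findMin lt2 l1 = findMin lt2 l2 :=
  findMin_perm lt2 lt2_irrefl (fun h => lt2_asymm h) (fun h1 h2 => lt2_ge_trans h1 h2)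
    (fun h1 h2 => lt2_antisymm h1 h2) hp

theorem scanMin3_eq_foldl : ∀ (l : List (Int × Int × Int)) (b : Int × Int × Int),
    scanMin3 b l = l.foldl (pymin lt3) b := by
  intro l
  induction l with
  | nil => intro b; simp [scanMin3, List.foldl]
  | cons e rest ih =>
    intro b
    simp only [scanMin3, List.foldl]
    rw [ih]
    rfl

theorem scanMin2_eq_foldl : ∀ (l : List (Int × Int)) (b : Int × Int),
    scanMin2 b l = l.foldl (pymin lt2) b := by
  intro l
  induction l with
  | nil => intro b; simp [scanMin2, List.foldl]
  | cons e rest ih =>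
    intro b
    simp only [scanMin2, List.foldl]
    rw [ih]
    rfl

theorem findMin3_cons_scan (b0 : Int × Int × Int) (bs : List (Int × Int × Int)) :
    findMin lt3 (b0 :: bs) = some (scanMin3 b0 bs) := by
  simp [findMin, scanMin3_eq_foldl]

theorem findMin2_cons_scan (f0 : Int × Int) (fs : List (Int × Int)) :
    findMin lt2 (f0 :: fs) = some (scanMin2 f0 fs) := by
  simp [findMin, scanMin2_eq_foldl]

theorem splitBusy_eq (i : Int) : ∀ (l : List (Int × Int × Int)),
    splitBusy i l = ((l.filter (fun e => decide (e.1 ≤ i))).map (fun e => (e.2.1, e.2.2)),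
                     l.filter (fun e => !decide (e.1 ≤ i))) := by
  intro l
  induction l with
  | nil => simp [splitBusy]
  | cons e rest ih =>
    simp only [splitBusy, ih]
    by_cases hc : e.1 ≤ i <;> simp [List.filter, hc]

theorem perm_isEmpty {α : Type} {l1 l2 : List α} (hp : l1.Perm l2) :
    l1.isEmpty = l2.isEmpty := by
  cases l1 with
  | nil => have := hp.symm.eq_nil; subst this; rfl
  | cons x xs =>
    cases l2 with
    | nil => exact absurd hp.eq_nil (by simp)
    | cons y ys => rfl

theorem drainA_perm : ∀ (i : Int) (q : List (Int × Int)) (t : List (Int × Int × Int)),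
    ((drainA i q t).1).Perm (q ++ (t.filter (fun e => decide (e.1 ≤ i))).map (fun e => (e.2.1, e.2.2))) ∧
    ((drainA i q t).2).Perm (t.filter (fun e => !decide (e.1 ≤ i))) := by
  intro i q t
  induction q, t using drainA.induct (i := i) with
  | case1 q t hm =>
    rw [findMin_none_iff] at hm; subst hm
    rw [drainA]
    simp [findMin]
  | case2 q t m hm hle ih =>
    rw [drainA, hm]
    dsimp only
    have hle' : m.1 ≤ i := hle
    rw [if_pos hle']
    have hd : decide (m.1 ≤ i) = true := by simpa using hle' 
    have hmem : m ∈ t := findMin_mem lt3 hm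
    have hperm : t.Perm (m :: t.erase m) := List.perm_cons_erase hmem
    have hfp : (t.filter (fun e => decide (e.1 ≤ i))).Perm
        (m :: (t.erase m).filter (fun e => decide (e.1 ≤ i))) := by
      have := hperm.filter (fun e => decide (e.1 ≤ i))
      simpa [List.filter_cons, hd] using this
    have hfn : (t.filter (fun e => !decide (e.1 ≤ i))).Perm
        ((t.erase m).filter (fun e => !decide (e.1 ≤ i))) := by
      have := hperm.filter (fun e => !decide (e.1 ≤ i))
      simpa [List.filter_cons, hd] using this
    refine ⟨ih.1.trans ?_, ih.2.trans hfn.symm⟩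
    have heq : (q ++ [(m.2.1, m.2.2)]) ++ ((t.erase m).filter (fun e => decide (e.1 ≤ i))).map (fun e => (e.2.1, e.2.2))
        = q ++ ((m :: (t.erase m).filter (fun e => decide (e.1 ≤ i))).map (fun e => (e.2.1, e.2.2))) := by
      simp
    rw [heq]
    exact (hfp.symm.map _).append_left q
  | case3 q t m hm hle =>
    rw [drainA, hm]
    dsimp only
    have hle' : ¬ m.1 ≤ i := hle
    rw [if_neg hle']
    have hlb := findMin_lb lt3 lt3_irrefl (fun h => lt3_asymm h) (fun h1 h2 => lt3_ge_trans h1 h2) hm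
    have hall : ∀ e ∈ t, ¬ (e.1 ≤ i) := by
      intro e he hei
      have := hlb e he
      obtain ⟨e1, e2, e3⟩ := e; obtain ⟨m1, m2, m3⟩ := m
      simp [lt3, lt2] at this hle' ⊢
      simp at hei
      omega
    constructor
    · have : t.filter (fun e => decide (e.1 ≤ i)) = [] := by
        rw [List.filter_eq_nil_iff]
        intro e he; simpa using hall e he
      simp [this]
    · have : t.filter (fun e => !decide (e.1 ≤ i)) = t := by
        rw [List.filter_eq_self]
        intro e he; simpa using hall e he
      simp [this]

theorem enum_fold_eq : ∀ (l : List (Int × Int)) (q : List (Int × Int)),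
    l.foldl (fun q p => q ++ [(p.2, p.1)]) q = q ++ l.map (fun p => (p.2, p.1)) := by
  intro l
  induction l with
  | nil => intro q; simp
  | cons p rest ih => intro q; simp [List.foldl, ih]

theorem go_eq : ∀ (ts : List Int) (i cur : Int) (q free : List (Int × Int))
    (t busy : List (Int × Int × Int)), q.Perm free → t.Perm busy →
    goA i cur q t ts = goB i cur free busy ts := by
  intro ts
  induction ts with
  | nil => intro i cur q free t busy hqf htb; rfl
  | cons task rest ih =>
    intro i cur q free t busy hqf htb
    simp only [goA, goB]
    rcases hA : drainA i q t with ⟨qa, ta⟩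
    rw [splitBusy_eq]
    have hd := drainA_perm i q t
    rw [hA] at hd
    obtain ⟨hd1, hd2⟩ := hd
    dsimp only at hd1 hd2 ⊢
    have hq1 : qa.Perm (free ++ (busy.filter (fun e => decide (e.1 ≤ i))).map (fun e => (e.2.1, e.2.2))) :=
      hd1.trans (hqf.append ((htb.filter _).map _))
    have ht1 : ta.Perm (busy.filter (fun e => !decide (e.1 ≤ i))) :=
      hd2.trans (htb.filter _)
    have hEB : (free ++ (busy.filter (fun e => decide (e.1 ≤ i))).map (fun e => (e.2.1, e.2.2))).isEmpty = qa.isEmpty :=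
      (perm_isEmpty hq1).symm
    rw [hEB]
    by_cases hE : qa.isEmpty
    · -- free list empty: pull the earliest busy server
      rw [List.isEmpty_iff] at hE
      have hfree1 : free ++ (busy.filter (fun e => decide (e.1 ≤ i))).map (fun e => (e.2.1, e.2.2)) = [] := by
        have := hq1.symm
        rw [hE] at this
        exact this.eq_nil
      subst hE
      rw [hfree1]
      simp only [List.isEmpty_nil, if_true]
      cases hbb : busy.filter (fun e => !decide (e.1 ≤ i)) with
      | nil =>
        have hta : ta = [] := by rw [hbb] at ht1; exact ht1.eq_nil
        subst hta
        simp only [findMin]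
        exact congrArg (0 :: ·) (ih _ _ _ _ _ _ (List.Perm.refl _) (List.Perm.refl _))
      | cons b0 bs =>
        rw [hbb] at ht1
        have hfm : findMin lt3 ta = some (scanMin3 b0 bs) := by
          rw [findMin3_perm ht1, findMin3_cons_scan]
        rw [hfm]
        dsimp only
        rw [List.nil_append, findMin2_cons_scan]
        dsimp only [scanMin2]
        exact congrArg _ (ih _ _ _ _ _ _ (List.Perm.refl _) ((ht1.erase _).append_right _))
    · -- free list nonempty: pick the lightest free server
      have hne : qa ≠ [] := by
        intro h0; subst h0; simp at hE
      cases hq : qa with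
      | nil => exact absurd hq hne
      | cons a0 as =>
        rw [hq] at hq1
        cases hf : free ++ (busy.filter (fun e => decide (e.1 ≤ i))).map (fun e => (e.2.1, e.2.2)) with
        | nil =>
          rw [hf] at hq1
          exact absurd hq1.eq_nil (by simp)
        | cons f0 fs =>
          rw [hf] at hq1
          simp only [List.isEmpty_cons, Bool.false_eq_true, if_false]
          have hfm : findMin lt2 (a0 :: as) = some (scanMin2 f0 fs) := by
            rw [findMin2_perm hq1, findMin2_cons_scan]
          rw [hfm]
          dsimp only
          exact congrArg _ (ih _ _ _ _ _ _ (hq1.erase _) (ht1.append_right _))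

-- ===== VERDICT (by name: the statement is the Claim_ definition above) =====
theorem assignTasks_spec : Claim_equal_assignTasks := by
  intro servers tasks _ _
  unfold Spec_assignTasks assignTasks assignTasks_alt
  rw [enum_fold_eq]
  exact go_eq tasks 0 0 _ _ [] [] (by simp) (List.Perm.refl _)
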